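-- pv_equiv track=rewrite | github.com/mario-single/KillSultan | apps/core_rules/helpers.py | count_circular_max_run
-- ===== SOURCE A (Python) =====
-- def count_circular_max_run(values: list[bool]) -> int:
--     if not values:
--         return 0
--     if all(values):
--         return len(values)
--
--     doubled = values + values
--     best = 0
--     current = 0
--     for item in doubled:
--         if item:
--             current += 1
--             best = max(best, min(current, len(values)))
--         else:
--             current = 0
--     return best
-- ===== SOURCE B (Python) =====
-- def count_circular_max_run(values: list[bool]) -> int:
--     if not values:
--         return 0
--     if all(values):
--         return len(values)
--
--     best = 0
--     cur = 0
--     for v in values: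
--         if v:
--             cur += 1
--             best = max(best, cur)
--         else:
--             cur = 0
--
--     prefix = 0
--     for v in values:
--         if v:
--             prefix += 1
--         else:
--             break
--
--     suffix = 0
--     for v in reversed(values):
--         if v:
--             suffix += 1
--         else:
--             break
--
--     return max(best, prefix + suffix)
-- ===== Notes on version B (the rewrite author's own statement) =====
-- stated objective: simpler
-- what changed: Instead of scanning a doubled copy of the list with a min-cap on the run length, B makes one pass over the original list for the longest internal run plus prefix/suffix scans, and returns max(internal, prefix+suffix) for the wrap-around run.
import Mathlib
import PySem

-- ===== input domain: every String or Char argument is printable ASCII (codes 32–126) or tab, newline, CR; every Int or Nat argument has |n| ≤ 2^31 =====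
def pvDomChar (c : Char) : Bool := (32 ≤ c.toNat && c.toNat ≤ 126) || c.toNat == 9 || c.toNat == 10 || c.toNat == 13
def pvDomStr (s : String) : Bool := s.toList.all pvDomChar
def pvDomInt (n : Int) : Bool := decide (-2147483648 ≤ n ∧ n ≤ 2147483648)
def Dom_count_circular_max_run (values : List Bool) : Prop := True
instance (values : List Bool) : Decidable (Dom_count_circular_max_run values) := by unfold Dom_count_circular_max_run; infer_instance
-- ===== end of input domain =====

-- B replaces A's scan of the doubled list by a single-copy scan plus prefix/suffix
-- counts, returning max(internal run, prefix+suffix); objective: simpler.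

-- ===== PORT A =====
def count_circular_max_run (values : List Bool) : Int :=
  if values = [] then 0
  else if values.all (fun x => x) then (values.length : Int)
  else
    let doubled := values ++ values
    let r := doubled.foldl (fun (s : Int × Int) item =>
      if item then
        (max s.1 (min (s.2 + 1) (values.length : Int)), s.2 + 1)
      else (s.1, 0)) (0, 0)
    r.1

-- ===== PORT B =====
-- the 'for v in …: if v: k += 1 else: break' loops of Source B
def pvPrefLoop : List Bool → Int
  | [] => 0
  | x :: xs => if x then 1 + pvPrefLoop xs else 0

def count_circular_max_run_alt (values : List Bool) : Int :=
  if values = [] then 0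
  else if values.all (fun x => x) then (values.length : Int)
  else
    let r := values.foldl (fun (s : Int × Int) v =>
      if v then (max s.1 (s.2 + 1), s.2 + 1) else (s.1, 0)) (0, 0)
    let pre := pvPrefLoop values
    let suf := pvPrefLoop values.reverse
    max r.1 (pre + suf)

-- ===== PRECONDITION & SPEC =====
def Spec_count_circular_max_run (values : List Bool) (out : Int) : Prop := out = count_circular_max_run_alt values
instance (values : List Bool) (out : Int) : Decidable (Spec_count_circular_max_run values out) := by unfold Spec_count_circular_max_run; infer_instance

-- ===== CLAIM (what is proved, stated in full; the proofs are below) =====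
def Claim_equal_count_circular_max_run : Prop := ∀ (values : List Bool), Dom_count_circular_max_run values → Spec_count_circular_max_run values (count_circular_max_run values)

-- ===== LEMMAS AND PROOFS =====

-- longest run of `true` anywhere in the list
def pvMaxRun : List Bool → Int
  | [] => 0
  | x :: xs => if x then max (1 + pvPrefLoop xs) (pvMaxRun xs) else pvMaxRun xs

-- length of the trailing run of `true`
def pvSufRun : List Bool → Int
  | [] => 0
  | x :: xs => if x && xs.all (fun y => y) then 1 + (xs.length : Int) else pvSufRun xs

theorem pvPrefLoop_nonneg (xs : List Bool) : 0 ≤ pvPrefLoop xs := by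
  induction xs with
  | nil => simp [pvPrefLoop]
  | cons x xs ih => simp only [pvPrefLoop]; split <;> omega

theorem pvMaxRun_nonneg (xs : List Bool) : 0 ≤ pvMaxRun xs := by
  induction xs with
  | nil => simp [pvMaxRun]
  | cons x xs ih => simp only [pvMaxRun]; split <;> omega

theorem pvSufRun_nonneg (xs : List Bool) : 0 ≤ pvSufRun xs := by
  induction xs with
  | nil => simp [pvSufRun]
  | cons x xs ih => simp only [pvSufRun]; split <;> push_cast <;> omega

theorem pvPrefLoop_le_maxRun (xs : List Bool) : pvPrefLoop xs ≤ pvMaxRun xs := by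
  cases xs with
  | nil => simp [pvPrefLoop, pvMaxRun]
  | cons x xs =>
      have := pvMaxRun_nonneg xs
      simp only [pvPrefLoop, pvMaxRun]; split <;> omega

theorem pvPrefLoop_allTrue (xs : List Bool) (h : xs.all (fun y => y) = true) :
    pvPrefLoop xs = (xs.length : Int) := by
  induction xs with
  | nil => simp [pvPrefLoop]
  | cons x xs ih =>
      simp only [List.all_cons, Bool.and_eq_true] at h
      simp only [pvPrefLoop, h.1, if_true, ih h.2, List.length_cons]
      push_cast; omega

theorem pvSufRun_allTrue (xs : List Bool) (h : xs.all (fun y => y) = true) :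
    pvSufRun xs = (xs.length : Int) := by
  induction xs with
  | nil => simp [pvSufRun]
  | cons x xs ih =>
      simp only [List.all_cons, Bool.and_eq_true] at h
      simp only [pvSufRun, h.1, h.2, Bool.and_true, if_true, List.length_cons]
      push_cast; omega

theorem pvSufRun_le_len (xs : List Bool) : pvSufRun xs ≤ (xs.length : Int) := by
  induction xs with
  | nil => simp [pvSufRun]
  | cons x xs ih => simp only [pvSufRun, List.length_cons]; split <;> push_cast <;> omega

theorem pvMaxRun_le_len (xs : List Bool) : pvMaxRun xs ≤ (xs.length : Int) := by
  induction xs with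
  | nil => simp [pvMaxRun]
  | cons x xs ih =>
      have hp : pvPrefLoop xs ≤ (xs.length : Int) :=
        le_trans (pvPrefLoop_le_maxRun xs) ih
      simp only [pvMaxRun, List.length_cons]; split <;> push_cast <;> omega

theorem pvSufRun_le_maxRun (xs : List Bool) : pvSufRun xs ≤ pvMaxRun xs := by
  induction xs with
  | nil => simp [pvSufRun, pvMaxRun]
  | cons x xs ih =>
      have hm := pvMaxRun_nonneg xs
      have hp := pvPrefLoop_nonneg xs
      simp only [pvSufRun, pvMaxRun]
      by_cases hx : x = true
      · by_cases ha : xs.all (fun y => y) = true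
        · have hlen := pvPrefLoop_allTrue xs ha
          simp only [hx, ha, Bool.and_true, if_true, hlen]
          omega
        · simp only [hx, ha, Bool.and_false, Bool.true_and, if_true]
          simp only [ha, Bool.false_eq_true, if_false] at *
          omega
      · simp at hx
        simp only [hx, Bool.false_and, Bool.false_eq_true, if_false]
        exact ih

theorem pvPrefLoop_add_sufRun_le (xs : List Bool) (h : ¬ xs.all (fun y => y) = true) :
    pvPrefLoop xs + pvSufRun xs ≤ (xs.length : Int) := by
  induction xs with
  | nil => simp at h
  | cons x xs ih =>
      simp only [pvPrefLoop, pvSufRun, List.length_cons]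
      by_cases hx : x = true
      · simp only [List.all_cons, hx, Bool.true_and] at h
        have := ih h
        simp only [hx, h, Bool.true_and, if_true, Bool.false_eq_true, if_false]
        push_cast; omega
      · simp at hx
        have h1 := pvSufRun_le_len xs
        simp only [hx, Bool.false_and, Bool.false_eq_true, if_false]
        push_cast; omega

-- characterization of B's (uncapped) fold
theorem fold_char (xs : List Bool) : ∀ b c : Int, 0 ≤ c → c ≤ b →
    xs.foldl (fun (s : Int × Int) v =>
      if v then (max s.1 (s.2 + 1), s.2 + 1) else (s.1, 0)) (b, c) =
    (max b (max (c + pvPrefLoop xs) (pvMaxRun xs)),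
     if xs.all (fun y => y) then c + (xs.length : Int) else pvSufRun xs) := by
  induction xs with
  | nil =>
      intro b c hc hcb
      simp [pvPrefLoop, pvMaxRun, pvSufRun]
      omega
  | cons x xs ih =>
      intro b c hc hcb
      by_cases hx : x = true
      · have H := ih (max b (c + 1)) (c + 1) (by omega) (by omega)
        simp only [List.foldl_cons, hx, if_true, H, pvPrefLoop, pvMaxRun, pvSufRun,
          List.all_cons, List.length_cons, Bool.true_and, Prod.mk.injEq]
        have hp := pvPrefLoop_nonneg xs
        have hm := pvMaxRun_nonneg xs
        refine ⟨by omega, ?_⟩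
        split <;> push_cast <;> omega
      · simp at hx
        have H := ih b 0 (by omega) (by omega)
        simp only [List.foldl_cons, hx, Bool.false_eq_true, if_false, H, pvPrefLoop,
          pvMaxRun, pvSufRun, List.all_cons, Bool.false_and, Prod.mk.injEq]
        have hp := pvPrefLoop_le_maxRun xs
        refine ⟨by omega, ?_⟩
        by_cases ha : xs.all (fun y => y) = true
        · simp only [ha, if_true, pvSufRun_allTrue xs ha]; omega
        · simp [ha]

-- A's capped fold equals the uncapped one while runs stay ≤ n
theorem fold_cap_eq (n : Int) (xs : List Bool) : ∀ b c : Int, 0 ≤ c →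
    c + pvPrefLoop xs ≤ n → pvMaxRun xs ≤ n →
    xs.foldl (fun (s : Int × Int) item =>
      if item then (max s.1 (min (s.2 + 1) n), s.2 + 1) else (s.1, 0)) (b, c) =
    xs.foldl (fun (s : Int × Int) v =>
      if v then (max s.1 (s.2 + 1), s.2 + 1) else (s.1, 0)) (b, c) := by
  induction xs with
  | nil => intro b c _ _ _; rfl
  | cons x xs ih =>
      intro b c hc hpre hmax
      by_cases hx : x = true
      · simp only [pvPrefLoop, pvMaxRun, hx, if_true] at hpre hmax
        have hp := pvPrefLoop_nonneg xs
        have hmin : min (c + 1) n = c + 1 := by omega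
        simp only [List.foldl_cons, hx, if_true, hmin]
        exact ih (max b (c + 1)) (c + 1) (by omega) (by omega) (by omega)
      · simp at hx
        simp only [pvPrefLoop, pvMaxRun, hx, Bool.false_eq_true, if_false] at hpre hmax
        have hp := pvPrefLoop_le_maxRun xs
        have hp0 := pvPrefLoop_nonneg xs
        simp only [List.foldl_cons, hx, Bool.false_eq_true, if_false]
        exact ih b 0 (by omega) (by omega) hmax

-- Source B's reversed-suffix loop computes pvSufRun
theorem prefLoop_append_singleton (ys : List Bool) (x : Bool) :
    pvPrefLoop (ys ++ [x]) =
      if ys.all (fun y => y) then (ys.length : Int) + (if x then 1 else 0)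
      else pvPrefLoop ys := by
  induction ys with
  | nil => simp [pvPrefLoop]
  | cons y ys ih =>
      simp only [List.cons_append, pvPrefLoop, List.all_cons, List.length_cons, ih]
      by_cases hy : y = true
      · by_cases ha : ys.all (fun y => y) = true
        · simp only [hy, ha, Bool.true_and, if_true]
          push_cast
          split <;> omega
        · simp [hy, ha]
      · simp at hy; simp [hy]

theorem prefLoop_reverse (xs : List Bool) : pvPrefLoop xs.reverse = pvSufRun xs := by
  induction xs with
  | nil => rfl
  | cons x xs ih =>
      simp only [List.reverse_cons, prefLoop_append_singleton, pvSufRun, ih,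
        List.all_reverse, List.length_reverse]
      by_cases ha : xs.all (fun y => y) = true
      · by_cases hx : x = true
        · simp only [ha, hx, Bool.and_true, if_true]
          omega
        · simp at hx
          simp only [ha, hx, Bool.and_true, Bool.false_eq_true, if_false, if_true]
          rw [pvSufRun_allTrue xs ha]
          omega
      · simp [ha]

-- ===== VERDICT (by name: the statement is the Claim_ definition above) =====
theorem count_circular_max_run_spec : Claim_equal_count_circular_max_run := by
  intro values _
  unfold Spec_count_circular_max_run count_circular_max_run count_circular_max_run_alt
  by_cases hnil : values = []
  · simp [hnil]
  · simp only [hnil, if_false]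
    by_cases hall : values.all (fun x => x) = true
    · simp [hall]
    · simp only [hall, Bool.false_eq_true, if_false]
      have hp0 := pvPrefLoop_nonneg values
      have hm0 := pvMaxRun_nonneg values
      have hs0 := pvSufRun_nonneg values
      have hpm := pvPrefLoop_le_maxRun values
      have hsm := pvSufRun_le_maxRun values
      have hml := pvMaxRun_le_len values
      have hps := pvPrefLoop_add_sufRun_le values hall
      rw [List.foldl_append]
      rw [fold_cap_eq (values.length : Int) values 0 0 le_rfl (by omega) hml]
      rw [fold_char values 0 0 le_rfl le_rfl]
      simp only [hall, Bool.false_eq_true, if_false]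
      rw [fold_cap_eq (values.length : Int) values _ (pvSufRun values) hs0 (by omega) hml]
      rw [fold_char values _ (pvSufRun values) hs0 (by omega)]
      dsimp only
      rw [prefLoop_reverse]
      omega
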